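-- pv_equiv track=rewrite | github.com/FrenchFive/wu-jiao-ya | main.py | parse
-- ===== SOURCE A (Python) =====
-- def parse(sen, TEXT_LEN):
--     TEXT_LEN += 10
--     phrases = sen.split('<--->')
--     for i in range(len(phrases)):
--         tweet = phrases[i].replace('\n', '')
--         if len(tweet) >= TEXT_LEN:
--             words = tweet.split()
--             truncwords = []
--             currentlen = 0
--             for word in words:
--                 currentlen += len(word) + 1
--                 if currentlen <= TEXT_LEN:
--                     truncwords.append(word)
--                 else:
--                     break
--             truncsen = ' '.join(truncwords)
--             if len(truncsen) < len(tweet):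
--                 truncsen += ' ...'
--             tweet = truncsen
--
--         phrases[i] = f'{tweet} ({i+1}/{len(phrases)})'
--
--     return(phrases)
-- ===== SOURCE B (Python) =====
-- from itertools import accumulate
-- from bisect import bisect_right
--
--
-- def parse(sen, TEXT_LEN):
--     limit = TEXT_LEN + 10
--     phrases = sen.split('<--->')
--     total = len(phrases)
--     out = []
--     for i, phrase in enumerate(phrases):
--         tweet = phrase.replace('\n', '')
--         if len(tweet) >= limit:
--             words = tweet.split()
--             sums = list(accumulate(len(w) + 1 for w in words))
--             cut = bisect_right(sums, limit)
--             truncsen = ' '.join(words[:cut])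
--             if len(truncsen) < len(tweet):
--                 truncsen += ' ...'
--             tweet = truncsen
--         out.append(f'{tweet} ({i + 1}/{total})')
--     return out
-- ===== Notes on version B (the rewrite author's own statement) =====
-- stated objective: alternative
-- what changed: The word-by-word truncation loop with a running length and break is replaced by a prefix-sum list (itertools.accumulate) plus bisect_right to find the cut index, slicing words[:cut]; the output list is built by appending instead of mutating phrases in place.
import Mathlib
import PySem

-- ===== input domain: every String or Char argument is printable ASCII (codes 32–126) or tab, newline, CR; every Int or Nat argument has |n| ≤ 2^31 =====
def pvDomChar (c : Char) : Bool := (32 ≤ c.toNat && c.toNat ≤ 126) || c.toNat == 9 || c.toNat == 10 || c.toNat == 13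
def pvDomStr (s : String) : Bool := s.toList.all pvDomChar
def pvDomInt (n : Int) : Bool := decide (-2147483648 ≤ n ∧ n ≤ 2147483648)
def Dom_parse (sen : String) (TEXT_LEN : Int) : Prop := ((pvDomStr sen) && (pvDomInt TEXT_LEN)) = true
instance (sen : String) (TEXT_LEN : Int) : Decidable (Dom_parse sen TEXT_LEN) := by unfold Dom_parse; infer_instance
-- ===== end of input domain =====

-- B replaces A's running-length truncation loop by prefix sums + bisect_right; same output (objective: alternative).

-- ===== PORT A =====
-- the inner 'for word in words: … break' loop of A, state = (truncwords (reversed acc), currentlen)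
def pvTruncA (T : Int) : List String → Int → List String → List String
  | [], _, acc => acc.reverse
  | w :: ws, cur, acc =>
    let cur' := cur + PySem.Str.len w + 1
    if cur' ≤ T then pvTruncA T ws cur' (w :: acc) else acc.reverse

-- body of A's outer loop for index i (phrases[i] = …)
def pvRenderA (T : Int) (n : Nat) (i : Int) (p : String) : String :=
  let tweet := PySem.Str.replace p "\n" ""
  let tweet :=
    if T ≤ PySem.Str.len tweet then
      let words := PySem.Str.split₀ tweet
      let truncsen := PySem.Str.join " " (pvTruncA T words 0 [])
      if PySem.Str.len truncsen < PySem.Str.len tweet then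
        PySem.Str.join "" [truncsen, " ..."]
      else truncsen
    else tweet
  PySem.Str.join "" [tweet, " (", PySem.Int.toStr (i + 1), "/", PySem.Int.toStr (n : Int), ")"]

def parse (sen : String) (TEXT_LEN : Int) : List String :=
  let T := TEXT_LEN + 10
  let phrases := (PySem.Str.split? sen "<--->").getD []   -- sep is non-empty, so split? is some
  (PySem.List.enumerate phrases).map (fun ip => pvRenderA T phrases.length ip.1 ip.2)

-- ===== PORT B =====
-- body of B's loop for index i: prefix sums (accumulate) + bisect_right
def pvRenderB (limit : Int) (total : Nat) (i : Int) (phrase : String) : String :=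
  let tweet := PySem.Str.replace phrase "\n" ""
  let tweet :=
    if limit ≤ PySem.Str.len tweet then
      let words := PySem.Str.split₀ tweet
      let sums := ((words.map (fun w => PySem.Str.len w + 1)).scanl (· + ·) 0).tail
      let cut := PySem.List.bisectRight sums limit
      let truncsen := PySem.Str.join " " (words.take cut)
      if PySem.Str.len truncsen < PySem.Str.len tweet then
        PySem.Str.join "" [truncsen, " ..."]
      else truncsen
    else tweet
  PySem.Str.join "" [tweet, " (", PySem.Int.toStr (i + 1), "/", PySem.Int.toStr (total : Int), ")"]

-- B's 'out.append(…)' loop over enumerate(phrases)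
def pvBuildB (limit : Int) (total : Nat) : List (Int × String) → List String → List String
  | [], out => out.reverse
  | ip :: rest, out => pvBuildB limit total rest (pvRenderB limit total ip.1 ip.2 :: out)

def parse_alt (sen : String) (TEXT_LEN : Int) : List String :=
  let limit := TEXT_LEN + 10
  let phrases := (PySem.Str.split? sen "<--->").getD []
  pvBuildB limit phrases.length (PySem.List.enumerate phrases) []

-- ===== PRECONDITION & SPEC =====
def Spec_parse (sen : String) (TEXT_LEN : Int) (out : List String) : Prop := out = parse_alt sen TEXT_LEN
instance (sen : String) (TEXT_LEN : Int) (out : List String) : Decidable (Spec_parse sen TEXT_LEN out) := by unfold Spec_parse; infer_instance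

-- ===== CLAIM (what is proved, stated in full; the proofs are below) =====
def Claim_equal_parse : Prop := ∀ (sen : String) (TEXT_LEN : Int), Dom_parse sen TEXT_LEN → Spec_parse sen TEXT_LEN (parse sen TEXT_LEN)

-- ===== LEMMAS AND PROOFS =====

-- the prefix-sum list starting from cur
def pvAccum (cur : Int) : List String → List Int
  | [] => []
  | w :: ws => (cur + PySem.Str.len w + 1) :: pvAccum (cur + PySem.Str.len w + 1) ws

-- the number of words A's loop keeps, starting with currentlen = cur
def pvCnt (T : Int) : Int → List String → Nat
  | _, [] => 0
  | cur, w :: ws =>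
    if cur + PySem.Str.len w + 1 ≤ T then pvCnt T (cur + PySem.Str.len w + 1) ws + 1 else 0

theorem pvLen_nonneg (w : String) : 0 ≤ PySem.Str.len w := by
  simp [PySem.Str.len]

theorem pvTruncA_eq_take (T : Int) (ws : List String) (cur : Int) (acc : List String) :
    pvTruncA T ws cur acc = acc.reverse ++ ws.take (pvCnt T cur ws) := by
  induction ws generalizing cur acc with
  | nil => simp [pvTruncA, pvCnt]
  | cons w ws ih =>
    simp only [pvTruncA, pvCnt]
    split_ifs with h
    · rw [ih]; simp
    · simp

theorem pvAccum_length (cur : Int) (ws : List String) : (pvAccum cur ws).length = ws.length := by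
  induction ws generalizing cur with
  | nil => simp [pvAccum]
  | cons w ws ih => simp [pvAccum, ih]

theorem pvAccum_lb (cur : Int) (ws : List String) : ∀ x ∈ pvAccum cur ws, cur + 1 ≤ x := by
  induction ws generalizing cur with
  | nil => simp [pvAccum]
  | cons w ws ih =>
    intro x hx
    simp only [pvAccum, List.mem_cons] at hx
    rcases hx with rfl | hx
    · have := pvLen_nonneg w; omega
    · have := ih (cur + PySem.Str.len w + 1) x hx
      have := pvLen_nonneg w; omega

theorem pvAccum_sorted (cur : Int) (ws : List String) :
    List.Pairwise (fun a b => a ≤ b) (pvAccum cur ws) := by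
  induction ws generalizing cur with
  | nil => simp [pvAccum]
  | cons w ws ih =>
    simp only [pvAccum, List.pairwise_cons]
    refine ⟨fun x hx => ?_, ih _⟩
    have := pvAccum_lb (cur + PySem.Str.len w + 1) ws x hx
    omega

theorem pvCnt_le (T cur : Int) (ws : List String) : pvCnt T cur ws ≤ ws.length := by
  induction ws generalizing cur with
  | nil => simp [pvCnt]
  | cons w ws ih =>
    simp only [pvCnt]; split_ifs with h
    · have := ih (cur + PySem.Str.len w + 1); simp only [List.length_cons]; omega
    · simp

theorem pvCnt_lt (T cur : Int) (ws : List String) :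
    ∀ (j : Nat) (hj : j < (pvAccum cur ws).length), j < pvCnt T cur ws →
      (pvAccum cur ws)[j] ≤ T := by
  induction ws generalizing cur with
  | nil => simp [pvCnt]
  | cons w ws ih =>
    intro j hj hjc
    simp only [pvCnt] at hjc
    split_ifs at hjc with h
    · match j with
      | 0 => simpa [pvAccum] using h
      | Nat.succ k =>
        simp only [pvAccum] at hj ⊢
        simp only [List.getElem_cons_succ]
        exact ih _ k (by simpa using hj) (by omega)
    · omega

theorem pvCnt_ge (T cur : Int) (ws : List String) :
    ∀ (j : Nat) (hj : j < (pvAccum cur ws).length), pvCnt T cur ws ≤ j →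
      T < (pvAccum cur ws)[j] := by
  induction ws generalizing cur with
  | nil => simp [pvAccum]
  | cons w ws ih =>
    intro j hj hjc
    simp only [pvCnt] at hjc
    split_ifs at hjc with h
    · match j with
      | 0 => omega
      | Nat.succ k =>
        simp only [pvAccum] at hj ⊢
        simp only [List.getElem_cons_succ]
        exact ih _ k (by simpa using hj) (by omega)
    · match j with
      | 0 => simpa [pvAccum] using lt_of_not_ge h
      | Nat.succ k =>
        simp only [pvAccum] at hj ⊢
        simp only [List.getElem_cons_succ]
        have hk : k < (pvAccum (cur + PySem.Str.len w + 1) ws).length := by simpa using hj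
        have hx := pvAccum_lb (cur + PySem.Str.len w + 1) ws _ (List.getElem_mem hk)
        have := pvLen_nonneg w
        omega

theorem pvBisect_eq_cnt (T : Int) (ws : List String) :
    PySem.List.bisectRight (pvAccum 0 ws) T = pvCnt T 0 ws := by
  obtain ⟨h1, h2, h3⟩ := PySem.List.bisectRight_spec (pvAccum 0 ws) T (pvAccum_sorted 0 ws)
  set k := PySem.List.bisectRight (pvAccum 0 ws) T with hk
  have hc := pvCnt_le T 0 ws
  have hlen := pvAccum_length 0 ws
  rcases Nat.lt_trichotomy k (pvCnt T 0 ws) with hlt | heq | hgt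
  · have hj : k < (pvAccum 0 ws).length := by omega
    have := pvCnt_lt T 0 ws k hj hlt
    have := h3 k hj (le_refl _)
    omega
  · exact heq
  · have hj : pvCnt T 0 ws < (pvAccum 0 ws).length := by omega
    have := pvCnt_ge T 0 ws _ hj (le_refl _)
    have := h2 _ hj hgt
    omega

theorem pvScanl_head (b : Int) (l : List Int) :
    List.scanl (· + ·) b l = b :: (List.scanl (· + ·) b l).tail := by
  cases l <;> simp [List.scanl_nil, List.scanl_cons]

theorem pvScanl_tail (cur : Int) (ws : List String) :
    ((ws.map (fun w => PySem.Str.len w + 1)).scanl (· + ·) cur).tail = pvAccum cur ws := by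
  induction ws generalizing cur with
  | nil => simp [pvAccum, List.scanl_nil]
  | cons w ws ih =>
    simp only [pvAccum, List.map_cons, List.scanl_cons, List.tail_cons]
    rw [pvScanl_head, ih]
    have hgr : cur + (PySem.Str.len w + 1) = cur + PySem.Str.len w + 1 := by ring
    rw [hgr]

theorem pvRender_eq (T : Int) (n : Nat) (i : Int) (p : String) :
    pvRenderA T n i p = pvRenderB T n i p := by
  simp only [pvRenderA, pvRenderB, pvTruncA_eq_take, pvScanl_tail, pvBisect_eq_cnt,
    List.reverse_nil, List.nil_append]

theorem pvBuildB_eq (limit : Int) (total : Nat) (l : List (Int × String)) (out : List String) :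
    pvBuildB limit total l out = out.reverse ++ l.map (fun ip => pvRenderB limit total ip.1 ip.2) := by
  induction l generalizing out with
  | nil => simp [pvBuildB]
  | cons p rest ih => simp [pvBuildB, ih]

-- ===== VERDICT (by name: the statement is the Claim_ definition above) =====
theorem parse_spec : Claim_equal_parse := by
  intro sen TEXT_LEN _
  unfold Spec_parse parse parse_alt
  simp only [pvBuildB_eq, pvRender_eq, List.reverse_nil, List.nil_append]
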